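-- pv_equiv track=rewrite | github.com/Brian-Ckwu/dsa-2023-spring | hw1/p2/1.py | findMissingID
-- ===== SOURCE A (Python) =====
-- def findMissingID(a: list[int], l: int, r: int) -> int:
--     while r - l > 1:
--         m = (r + l) // 2
--         lv = a[l] if l >= 0 else 0
--         mv = a[m] if m >= 0 else 0
--         if mv - lv == m - l:
--             l = m
--         else: # a[m] - a[l] == m - l
--             r = m
--     lv = a[l] if l >= 0 else 0
--     return lv + 1
-- ===== SOURCE B (Python) =====
-- def _solve(a, l, r, lv):
--     if r - l <= 1:
--         return lv + 1
--     m = (l + r) // 2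
--     mv = a[m] if m >= 0 else 0
--     if mv - lv == m - l:
--         return _solve(a, m, r, mv)
--     return _solve(a, l, m, lv)
--
--
-- def findMissingID(a: list[int], l: int, r: int) -> int:
--     lv = a[l] if l >= 0 else 0
--     return _solve(a, l, r, lv)
-- ===== Notes on version B (the rewrite author's own statement) =====
-- stated objective: alternative
-- what changed: The while-loop binary search becomes a recursive divide-and-conquer helper that threads the current left value lv as an accumulator (passing mv down when recursing right), so a[l] is read once per call instead of re-read every iteration.
-- outside the precondition, e.g. on findMissingID([0, 5, 6], 0, 4): A returns 1, B returns 1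
import Mathlib
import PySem

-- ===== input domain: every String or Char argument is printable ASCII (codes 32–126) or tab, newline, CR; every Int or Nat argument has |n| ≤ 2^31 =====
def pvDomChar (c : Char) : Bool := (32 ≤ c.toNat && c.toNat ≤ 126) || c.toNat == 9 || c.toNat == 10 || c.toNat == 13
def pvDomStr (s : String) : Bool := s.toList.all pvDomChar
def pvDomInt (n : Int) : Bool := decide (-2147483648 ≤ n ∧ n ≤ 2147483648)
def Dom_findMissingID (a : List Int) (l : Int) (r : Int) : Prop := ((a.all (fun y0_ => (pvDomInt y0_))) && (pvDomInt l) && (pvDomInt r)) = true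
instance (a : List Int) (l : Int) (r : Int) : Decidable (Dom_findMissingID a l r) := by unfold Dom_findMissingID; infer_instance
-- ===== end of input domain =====

-- B replaces A's while-loop by a recursive divide-and-conquer helper that threads the current
-- left value lv as an accumulator, so a[l] is read once instead of on every iteration.

-- midpoint bounds used by both ports for termination
theorem pvMid_lt {l r : Int} (h : r - l > 1) :
    l < PySem.Int.floordiv (r + l) 2 ∧ PySem.Int.floordiv (r + l) 2 < r := by
  rw [PySem.Int.floordiv_eq_ediv_of_pos (by omega)]
  omega

-- ===== PORT A =====
def findMissingID (a : List Int) (l : Int) (r : Int) : Int :=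
  if h : r - l > 1 then
    let m := PySem.Int.floordiv (r + l) 2
    let lv := if l ≥ 0 then (PySem.List.pyGet? a l).getD 0 else 0
    let mv := if m ≥ 0 then (PySem.List.pyGet? a m).getD 0 else 0
    if mv - lv == m - l then findMissingID a m r else findMissingID a l m
  else
    (if l ≥ 0 then (PySem.List.pyGet? a l).getD 0 else 0) + 1
termination_by (r - l).toNat
decreasing_by
  · have := pvMid_lt h; omega
  · have := pvMid_lt h; omega

-- ===== PORT B =====
def solveAlt (a : List Int) (l : Int) (r : Int) (lv : Int) : Int :=
  if h : r - l ≤ 1 then lv + 1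
  else
    let m := PySem.Int.floordiv (l + r) 2
    let mv := if m ≥ 0 then (PySem.List.pyGet? a m).getD 0 else 0
    if mv - lv == m - l then solveAlt a m r mv else solveAlt a l m lv
termination_by (r - l).toNat
decreasing_by
  · have := pvMid_lt (l := l) (r := r) (by omega); rw [Int.add_comm] at this; omega
  · have := pvMid_lt (l := l) (r := r) (by omega); rw [Int.add_comm] at this; omega

def findMissingID_alt (a : List Int) (l : Int) (r : Int) : Int :=
  solveAlt a l r (if l ≥ 0 then (PySem.List.pyGet? a l).getD 0 else 0)

-- ===== PRECONDITION & SPEC =====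
-- A raises IndexError when it reads a nonnegative index ≥ len(a); all indices it reads lie in
-- [l, r) (when r-l>1) or are l itself (when r-l≤1), so Pre_ keeps those inside the list.
-- This is slightly narrower than the exact raise set: a search that happens to turn left early
-- can return even with r > len(a); such inputs are excluded (see cites), B agrees with A there anyway.
def Pre_findMissingID (a : List Int) (l : Int) (r : Int) : Prop :=
  (r - l ≤ 1 → (0 ≤ l → l < (a.length : Int))) ∧ (r - l > 1 → r ≤ (a.length : Int))
instance (a : List Int) (l : Int) (r : Int) : Decidable (Pre_findMissingID a l r) := by
  unfold Pre_findMissingID; infer_instance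

def pvWitness_findMissingID : List Int × Int × Int := ([1, 2, 4, 5], 0, 4)

def Spec_findMissingID (a : List Int) (l : Int) (r : Int) (out : Int) : Prop := out = findMissingID_alt a l r
instance (a : List Int) (l : Int) (r : Int) (out : Int) : Decidable (Spec_findMissingID a l r out) := by unfold Spec_findMissingID; infer_instance

-- ===== CLAIM (what is proved, stated in full; the proofs are below) =====
def Claim_equal_findMissingID : Prop := ∀ (a : List Int) (l : Int) (r : Int), Dom_findMissingID a l r → Pre_findMissingID a l r → Spec_findMissingID a l r (findMissingID a l r)

-- ===== LEMMAS AND PROOFS =====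

-- loop ↔ recursion-with-accumulator, by strong induction on the interval width
theorem findMissingID_eq_solveAlt (n : Nat) :
    ∀ (a : List Int) (l r : Int), (r - l).toNat = n →
      findMissingID a l r = solveAlt a l r (if l ≥ 0 then (PySem.List.pyGet? a l).getD 0 else 0) := by
  induction n using Nat.strong_induction_on with
  | _ n ih =>
    intro a l r hn
    rw [findMissingID, solveAlt]
    by_cases h : r - l > 1
    · have hmid := pvMid_lt h
      simp only [h, dite_true, show ¬ (r - l ≤ 1) by omega, dite_false]
      rw [Int.add_comm l r]
      set m := PySem.Int.floordiv (r + l) 2 with hm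
      by_cases hc : ((if m ≥ 0 then (PySem.List.pyGet? a m).getD 0 else 0) -
          (if l ≥ 0 then (PySem.List.pyGet? a l).getD 0 else 0) == m - l)
      · simp only [hc, if_true]
        exact ih (r - m).toNat (by omega) a m r rfl
      · simp only [hc]
        exact ih (m - l).toNat (by omega) a l m rfl
    · simp only [h, dite_false, show r - l ≤ 1 by omega, dite_true]

-- ===== VERDICT (by name: the statement is the Claim_ definition above) =====
theorem findMissingID_spec : Claim_equal_findMissingID := by
  intro a l r _ _
  unfold Spec_findMissingID findMissingID_alt
  exact findMissingID_eq_solveAlt (r - l).toNat a l r rfl
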